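-- pv_equiv track=rewrite | github.com/Shntia/Algorithm-QueraCollege | dbazgashti.py | f
-- ===== SOURCE A (Python) =====
-- def f(x):
--     if x == 0:
--         return 5
--     temp = f(x - 1)
--     if x % 2 == 0:
--
--         out = temp - 21
--         return out
--
--     else:
--         return temp ** 2
-- ===== SOURCE B (Python) =====
-- def f(x):
--     result = 5
--     for i in range(1, x + 1):
--         result = result ** 2 if i % 2 == 1 else result - 21
--     return result
-- ===== Notes on version B (the rewrite author's own statement) =====
-- stated objective: simpler
-- what changed: Replaces the top-down recursion with a bottom-up for-loop over range(1, x+1) that folds the alternating square/subtract-21 step into an accumulator starting at 5.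
import Mathlib
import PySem

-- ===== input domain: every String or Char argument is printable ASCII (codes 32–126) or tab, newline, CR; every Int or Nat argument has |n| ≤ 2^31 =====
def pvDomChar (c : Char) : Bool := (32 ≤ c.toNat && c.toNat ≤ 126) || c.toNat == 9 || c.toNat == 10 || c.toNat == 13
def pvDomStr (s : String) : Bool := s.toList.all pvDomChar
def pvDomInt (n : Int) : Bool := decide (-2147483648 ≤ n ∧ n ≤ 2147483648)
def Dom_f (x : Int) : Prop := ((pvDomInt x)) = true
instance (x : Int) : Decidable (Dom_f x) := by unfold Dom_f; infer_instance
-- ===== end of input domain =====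

-- ===== PORT A =====
-- B replaces A's top-down recursion with a bottom-up loop; RETURN value equivalence on 0 ≤ x.
-- literal port of A's recursion; the recursion is on x.toNat (for x < 0 Python A
-- recurses forever / raises RecursionError, excluded by Pre_f).
def fAux : Nat → Int
  | 0 => 5
  | n + 1 =>
    let x : Int := (n : Int) + 1
    let temp := fAux n
    if x % 2 == 0 then temp - 21 else temp ^ 2

def f (x : Int) : Int := fAux x.toNat

-- ===== PORT B =====
def f_alt (x : Int) : Int :=
  (PySem.List.pyRange 1 (x + 1) 1).foldl
    (fun result i => if i % 2 == 1 then result ^ 2 else result - 21) 5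

-- ===== PRECONDITION & SPEC =====
-- Pre_f excludes x < 0, on which Python A recurses without reaching the base case (RecursionError).
def Pre_f (x : Int) : Prop := 0 ≤ x
instance (x : Int) : Decidable (Pre_f x) := by unfold Pre_f; infer_instance
def pvWitness_f : Int := (3)

def Spec_f (x : Int) (out : Int) : Prop := out = f_alt x
instance (x : Int) (out : Int) : Decidable (Spec_f x out) := by unfold Spec_f; infer_instance

-- ===== CLAIM (what is proved, stated in full; the proofs are below) =====
def Claim_equal_f : Prop := ∀ (x : Int), Dom_f x → Pre_f x → Spec_f x (f x)

-- ===== LEMMAS AND PROOFS =====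
lemma f_alt_nat (n : Nat) :
    (PySem.List.pyRange 1 ((n : Int) + 1) 1).foldl
      (fun result i => if i % 2 == 1 then result ^ 2 else result - 21) 5 = fAux n := by
  induction n with
  | zero => simp [PySem.List.pyRange_one_eq_nil, fAux]
  | succ n ih =>
    have h1 : ((n + 1 : Nat) : Int) + 1 = ((n : Int) + 1) + 1 := by push_cast; ring
    rw [h1, PySem.List.pyRange_one_succ_right (by omega), List.foldl_append, ih]
    simp only [List.foldl]
    have hm : ((n : Int) + 1) % 2 = 0 ∨ ((n : Int) + 1) % 2 = 1 := by omega
    rcases hm with h | h <;> simp [fAux, h]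

-- ===== VERDICT (by name: the statement is the Claim_ definition above) =====
theorem f_spec : Claim_equal_f := by
  intro x _ hx
  unfold Spec_f f f_alt
  have hxx : ((x.toNat : Int)) = x := Int.toNat_of_nonneg hx
  rw [← hxx, f_alt_nat]
  rw [Int.toNat_natCast]
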